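-- pv_equiv track=rewrite | github.com/shankarkrishnamurthy/problem-solving | take-k-of-each-character-from-left-and-right.py | takeCharacters
-- ===== SOURCE A (Python) =====
-- def takeCharacters(s, k):
--     a, b, c = [], [], []
--     for i,v in enumerate(s):
--         if v == 'a': a.append(i)
--         elif v == 'b': b.append(i)
--         else: c.append(i)
--     if k == 0: return 0
--     if len(a) <k or len(b) < k or len(c) < k: return -1
--     na, nb ,nc, res  = 0, 0, 0, len(s) - min(a[-k], b[-k], c[-k])
--     for i,v in enumerate(s):
--         na, nb ,nc = na+(v=='a'), nb+(v=='b'), nc+(v=='c')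
--         fi1 = a[na-k] if k - na > 0 else len(s)
--         fi2 = b[nb-k] if k - nb > 0 else len(s)
--         fi3 = c[nc-k] if k - nc > 0 else len(s)
--         res = min(res, i+1+len(s) - min(fi1, fi2, fi3))
--     return res
-- ===== SOURCE B (Python) =====
-- def _advance(s, k, na, nb, nc, sa, sb, sc, q):
--     # push the suffix start q forward while s[q:] can still supply whatever
--     # the prefix has not supplied yet
--     while q < len(s):
--         v = s[q]
--         nsa = sa - (v == 'a')
--         nsb = sb - (v == 'b')
--         nsc = sc - (v != 'a' and v != 'b')
--         if k - na <= nsa and k - nb <= nsb and k - nc <= nsc: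
--             sa, sb, sc, q = nsa, nsb, nsc, q + 1
--         else:
--             break
--     return sa, sb, sc, q
--
-- def takeCharacters(s, k):
--     # Two pointers: for each prefix length, the furthest suffix start that
--     # still completes the quotas; the pointer only moves forward, so a single
--     # linear scan suffices and no per-character index lists are built.
--     if k == 0:
--         return 0
--     n = len(s)
--     ta = s.count('a')
--     tb = s.count('b')
--     tc = n - ta - tb
--     if ta < k or tb < k or tc < k:
--         return -1
--     sa, sb, sc, q = _advance(s, k, 0, 0, 0, ta, tb, tc, 0)
--     best = n - q
--     na = nb = nc = 0
--     for i, v in enumerate(s):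
--         na += (v == 'a')
--         nb += (v == 'b')
--         nc += (v != 'a' and v != 'b')
--         sa, sb, sc, q = _advance(s, k, na, nb, nc, sa, sb, sc, q)
--         cost = i + 1 + n - q
--         if cost < best:
--             best = cost
--     return best
-- ===== Notes on version B (the rewrite author's own statement) =====
-- stated objective: faster
-- what changed: B replaces A's precomputed per-bucket index lists (built by per-character appends and read back with Python negative indexing every iteration) by a single amortised two-pointer sweep over suffix starts with running bucket counts; …
-- outside the precondition, e.g. on takeCharacters('adbb', 1): A returns 4, B returns 3; on takeCharacters('aabbcc', -1): A returns 1, B returns 0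
import Mathlib
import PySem

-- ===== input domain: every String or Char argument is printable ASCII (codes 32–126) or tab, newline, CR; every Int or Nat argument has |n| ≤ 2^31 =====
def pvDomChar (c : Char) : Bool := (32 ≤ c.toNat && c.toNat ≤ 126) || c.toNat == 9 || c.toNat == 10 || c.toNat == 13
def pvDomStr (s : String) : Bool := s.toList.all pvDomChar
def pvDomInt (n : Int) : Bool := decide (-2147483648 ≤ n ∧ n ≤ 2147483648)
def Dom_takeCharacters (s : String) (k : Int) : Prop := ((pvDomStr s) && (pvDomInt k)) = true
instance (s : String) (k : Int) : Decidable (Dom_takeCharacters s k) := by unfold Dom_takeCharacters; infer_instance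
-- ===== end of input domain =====

-- B replaces A's precomputed per-bucket index lists (with Python negative indexing) by an
-- amortised two-pointer sweep over suffix starts with running bucket counts; same O(n) cost.

-- ===== PORT A =====
def takeCharacters (s : String) (k : Int) : Int :=
  let cs := s.toList
  let abc := (PySem.List.enumerate cs).foldl
      (fun (acc : List Int × List Int × List Int) iv =>
        if iv.2 = 'a' then (acc.1 ++ [iv.1], acc.2.1, acc.2.2)
        else if iv.2 = 'b' then (acc.1, acc.2.1 ++ [iv.1], acc.2.2)
        else (acc.1, acc.2.1, acc.2.2 ++ [iv.1]))
      ([], [], [])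
  let a := abc.1
  let b := abc.2.1
  let c := abc.2.2
  if k = 0 then 0
  else if (a.length : Int) < k ∨ (b.length : Int) < k ∨ (c.length : Int) < k then -1
  else
    let n : Int := cs.length
    let res0 := n - min (min (PySem.List.pyGetD a (-k) 0) (PySem.List.pyGetD b (-k) 0))
                        (PySem.List.pyGetD c (-k) 0)
    let st := (PySem.List.enumerate cs).foldl
      (fun (st : Int × Int × Int × Int) iv =>
        let na := st.1 + (if iv.2 = 'a' then 1 else 0)
        let nb := st.2.1 + (if iv.2 = 'b' then 1 else 0)
        let nc := st.2.2.1 + (if iv.2 = 'c' then 1 else 0)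
        let fi1 := if 0 < k - na then PySem.List.pyGetD a (na - k) 0 else n
        let fi2 := if 0 < k - nb then PySem.List.pyGetD b (nb - k) 0 else n
        let fi3 := if 0 < k - nc then PySem.List.pyGetD c (nc - k) 0 else n
        (na, nb, nc, min st.2.2.2 (iv.1 + 1 + n - min (min fi1 fi2) fi3)))
      (0, 0, 0, res0)
    st.2.2.2


-- ===== PORT B =====
-- total counts of the three buckets ('a' / 'b' / everything else), one pass
def tcCounts (cs : List Char) : Int × Int × Int :=
  cs.foldl (fun t v =>
      if v = 'a' then (t.1 + 1, t.2.1, t.2.2)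
      else if v = 'b' then (t.1, t.2.1 + 1, t.2.2)
      else (t.1, t.2.1, t.2.2 + 1))
    (0, 0, 0)

-- _advance: the suffix-pointer while loop; the suffix s[q:] is carried as a list, its
-- bucket counts as the triple t (q in Source B = len(s) minus the length of that suffix)
def tcAdvance (k na nb nc : Int) : Int × Int × Int → List Char → (Int × Int × Int) × List Char
  | t, [] => (t, [])
  | t, v :: r =>
    let nsa := t.1 - (if v = 'a' then 1 else 0)
    let nsb := t.2.1 - (if v = 'b' then 1 else 0)
    let nsc := t.2.2 - (if v ≠ 'a' ∧ v ≠ 'b' then 1 else 0)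
    if k - na ≤ nsa ∧ k - nb ≤ nsb ∧ k - nc ≤ nsc then
      tcAdvance k na nb nc (nsa, nsb, nsc) r
    else (t, v :: r)

def takeCharacters_alt (s : String) (k : Int) : Int :=
  if k = 0 then 0
  else
    let cs := s.toList
    let t := tcCounts cs
    if t.1 < k ∨ t.2.1 < k ∨ t.2.2 < k then -1
    else
      let ar := tcAdvance k 0 0 0 t cs
      let st := (PySem.List.enumerate cs).foldl
        (fun (st : (Int × Int × Int) × (Int × Int × Int) × List Char × Int) iv =>
          let na := st.1.1 + (if iv.2 = 'a' then 1 else 0)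
          let nb := st.1.2.1 + (if iv.2 = 'b' then 1 else 0)
          let nc := st.1.2.2 + (if iv.2 ≠ 'a' ∧ iv.2 ≠ 'b' then 1 else 0)
          let ar := tcAdvance k na nb nc st.2.1 st.2.2.1
          let cost := iv.1 + 1 + (ar.2.length : Int)
          ((na, nb, nc), ar.1, ar.2,
            if cost < st.2.2.2 then cost else st.2.2.2))
        ((0, 0, 0), ar.1, ar.2, (ar.2.length : Int))
      st.2.2.2


-- ===== PRECONDITION & SPEC =====
-- Pre_ excludes negative k, outside the function's natural domain (there A raises
-- IndexError or returns an accidental value of its wraparound indexing), and strings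
-- with characters outside the task's alphabet 'a','b','c' in the non-trivial case
-- (k ≥ 1 and every bucket large enough): there A's feasibility check counts every
-- foreign character as 'c' while its prefix quota counts only literal 'c' — an
-- inconsistency of A's implementation.
def Pre_takeCharacters (s : String) (k : Int) : Prop :=
  0 ≤ k ∧ ((s.toList.all (fun c => c == 'a' || c == 'b' || c == 'c')) = true ∨ k = 0 ∨
    (s.toList.count 'a' : Int) < k ∨ (s.toList.count 'b' : Int) < k ∨
    ((s.toList.length : Int) - (s.toList.count 'a' : Int) - (s.toList.count 'b' : Int)) < k)
instance (s : String) (k : Int) : Decidable (Pre_takeCharacters s k) := by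
  unfold Pre_takeCharacters; infer_instance

def pvWitness_takeCharacters : String × Int := ("aabbcc", 1)

def Spec_takeCharacters (s : String) (k : Int) (out : Int) : Prop := out = takeCharacters_alt s k
instance (s : String) (k : Int) (out : Int) : Decidable (Spec_takeCharacters s k out) := by unfold Spec_takeCharacters; infer_instance

-- ===== CLAIM (what is proved, stated in full; the proofs are below) =====
def Claim_equal_takeCharacters : Prop := ∀ (s : String) (k : Int), Dom_takeCharacters s k → Pre_takeCharacters s k → Spec_takeCharacters s k (takeCharacters s k)

-- ===== LEMMAS AND PROOFS =====

-- bucket membership predicates: 'a', 'b', literal 'c', and 'everything else'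
-- (under Pre_ the last two agree on every character of the string)
def tcPa : Char → Bool := fun v => v == 'a'
def tcPb : Char → Bool := fun v => v == 'b'
def tcPc : Char → Bool := fun v => v == 'c'
def tcPe : Char → Bool := fun v => !(v == 'a') && !(v == 'b')
def tcIdxs (P : Char → Bool) : List Char → Int → List Int
  | [], _ => []
  | v :: r, s0 => (if P v then [s0] else []) ++ tcIdxs P r (s0 + 1)

theorem tcIdxs_length (P : Char → Bool) (cs : List Char) (s0 : Int) :
    (tcIdxs P cs s0).length = cs.countP P := by
  induction cs generalizing s0 with
  | nil => simp [tcIdxs]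
  | cons v r ih => by_cases h : P v <;> simp [tcIdxs, h, ih]

theorem tcIdxs_bounds (P : Char → Bool) (cs : List Char) (s0 : Int) :
    ∀ x ∈ tcIdxs P cs s0, s0 ≤ x ∧ x < s0 + cs.length := by
  induction cs generalizing s0 with
  | nil => simp [tcIdxs]
  | cons v r ih =>
    intro x hx
    simp only [tcIdxs, List.mem_append] at hx
    have hlen : ((v :: r).length : Int) = (r.length : Int) + 1 := by simp
    rcases hx with hx | hx
    · have hx' : x = s0 := by
        by_cases h : P v
        · simpa [h] using hx
        · simp [h] at hx
      subst hx'; refine ⟨le_refl _, by rw [hlen]; omega⟩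
    · have := ih (s0 + 1) x hx
      refine ⟨by omega, by rw [hlen]; omega⟩

theorem tcIdxs_sorted (P : Char → Bool) (cs : List Char) (s0 : Int) :
    (tcIdxs P cs s0).Pairwise (· < ·) := by
  induction cs generalizing s0 with
  | nil => simp [tcIdxs]
  | cons v r ih =>
    by_cases h : P v <;> simp [tcIdxs, h]
    · constructor
      · intro y hy; exact lt_of_lt_of_le (by omega) (tcIdxs_bounds P r (s0+1) y hy).1
      · exact ih (s0 + 1)
    · exact ih (s0 + 1)

theorem tcIdxs_count_take (P : Char → Bool) (cs : List Char) (s0 : Int) (q : Nat) :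
    ((tcIdxs P cs s0).countP (fun x => decide (x < s0 + q))) = (cs.take q).countP P := by
  induction cs generalizing s0 q with
  | nil => simp [tcIdxs]
  | cons v r ih =>
    cases q with
    | zero =>
      simp only [List.take_zero, List.countP_nil]
      rw [List.countP_eq_zero]
      intro x hx
      have := tcIdxs_bounds P (v :: r) s0 x hx
      simp only [Nat.cast_zero, add_zero, decide_eq_true_eq]
      omega
    | succ q =>
      have hshift : ∀ x : Int, (x < s0 + ((q : Nat) + 1 : Nat)) ↔ (x < (s0 + 1) + (q : Nat)) := by
        intro x; push_cast; omega
      have hcong : ((tcIdxs P r (s0+1)).countP (fun x => decide (x < s0 + ((q : Nat) + 1 : Nat))))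
          = ((tcIdxs P r (s0+1)).countP (fun x => decide (x < (s0 + 1) + (q : Nat)))) := by
        apply List.countP_congr; intro x _; simp only [decide_eq_true_eq]; exact hshift x
      by_cases h : P v
      · simp only [tcIdxs, h, if_pos, List.countP_append, List.take_succ_cons, List.countP_cons, h]
        rw [hcong, ih (s0+1) q]
        have : (s0 < s0 + ((q:Nat)+1:Nat)) := by push_cast; omega
        simp [this]
        omega
      · simp only [tcIdxs, h, if_neg, Bool.false_eq_true, not_false_iff, List.nil_append,
          List.take_succ_cons, List.countP_cons, h]
        rw [hcong, ih (s0+1) q]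
        simp [h]

theorem sorted_le_getElem_iff (a : List Int) (ha : a.Pairwise (· < ·)) :
    ∀ (j : Nat) (hj : j < a.length) (q : Int),
      (q ≤ a[j] ↔ a.countP (fun x => decide (x < q)) ≤ j) := by
  induction a with
  | nil => intro j hj; simp at hj
  | cons x t ih =>
    intro j hj q
    have hx : ∀ y ∈ t, x < y := fun y hy => (List.pairwise_cons.1 ha).1 y hy
    have ht : t.Pairwise (· < ·) := (List.pairwise_cons.1 ha).2
    by_cases hq : x < q
    · cases j with
      | zero =>
        simp only [List.getElem_cons_zero, List.countP_cons, hq, decide_true, if_true]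
        constructor
        · intro h; omega
        · intro h; omega
      | succ j' =>
        simp only [List.getElem_cons_succ, List.countP_cons, hq, decide_true, if_true]
        rw [ih ht j' (by simpa using hj) q]
        omega
    · have hcount : (x :: t).countP (fun x => decide (x < q)) = 0 := by
        rw [List.countP_eq_zero]
        intro y hy
        simp only [List.mem_cons] at hy
        simp only [decide_eq_true_eq]
        rcases hy with rfl | hy
        · omega
        · have := hx y hy; omega
      have hxj : x ≤ (x :: t)[j] := by
        cases j with
        | zero => simp
        | succ j' =>
          simp only [List.getElem_cons_succ]
          exact le_of_lt (hx _ (List.getElem_mem _))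
      exact iff_of_true (le_trans (by omega) hxj) (by rw [hcount]; omega)

def tcN (P : Char → Bool) (cs : List Char) (p : Nat) : Int := ((cs.take p).countP P : Int)
def tcC (P : Char → Bool) (cs : List Char) (q : Nat) : Int := ((cs.drop q).countP P : Int)

def tcFi1 (P : Char → Bool) (cs : List Char) (k na : Int) : Int :=
  if 0 < k - na then PySem.List.pyGetD (tcIdxs P cs 0) (na - k) 0 else (cs.length : Int)

def tcFiC (cs : List Char) (k na nb nc : Int) : Int :=
  min (min (tcFi1 tcPa cs k na) (tcFi1 tcPb cs k nb)) (tcFi1 tcPe cs k nc)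

def tcSuffC (cs : List Char) (k na nb nc : Int) (q : Nat) : Prop :=
  k - na ≤ tcC tcPa cs q ∧ k - nb ≤ tcC tcPb cs q ∧ k - nc ≤ tcC tcPe cs q

-- per-class: the suffix from q still holds k - na characters of bucket P  ↔  q ≤ fi
theorem tcFi1_iff (P : Char → Bool) (cs : List Char) (k na : Int)
    (hk : 1 ≤ k) (h0 : 0 ≤ na) (htot : k ≤ (cs.countP P : Int))
    (q : Nat) (hq : q ≤ cs.length) :
    (k - na ≤ tcC P cs q) ↔ ((q : Int) ≤ tcFi1 P cs k na) := by
  unfold tcFi1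
  by_cases h : 0 < k - na
  · rw [if_pos h]
    set a := tcIdxs P cs 0 with ha
    have hla : a.length = cs.countP P := tcIdxs_length P cs 0
    set m : Nat := (k - na).toNat with hm
    have hm1 : 1 ≤ m := by omega
    have hmla : m ≤ a.length := by rw [hla]; omega
    have hget : PySem.List.pyGetD a (na - k) 0 = a[a.length - m] := by
      have : na - k = -(m : Int) := by omega
      rw [this]
      exact PySem.List.pyGetD_neg_natCast a m 0 (by omega) hmla
    rw [hget]
    have hsplit : cs.countP P = (cs.take q).countP P + (cs.drop q).countP P := by
      conv_lhs => rw [← List.take_append_drop q cs]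
      rw [List.countP_append]
    have hj : a.length - m < a.length := by omega
    have hiff := sorted_le_getElem_iff a (by rw [ha]; exact tcIdxs_sorted P cs 0)
      (a.length - m) hj (q : Int)
    have hcnt : a.countP (fun x => decide (x < (q : Int))) = (cs.take q).countP P := by
      rw [ha, ← tcIdxs_count_take P cs 0 q]
      apply List.countP_congr; intro x _
      simp only [decide_eq_true_eq, zero_add]
    rw [hcnt] at hiff
    rw [hiff]
    unfold tcC
    omega
  · rw [if_neg h]
    have : (0 : Int) ≤ tcC P cs q := by unfold tcC; positivity
    exact iff_of_true (by omega) (by exact_mod_cast hq)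

theorem tcFi1_le (P : Char → Bool) (cs : List Char) (k na : Int)
    (hk : 1 ≤ k) (h0 : 0 ≤ na) (htot : k ≤ (cs.countP P : Int)) :
    tcFi1 P cs k na ≤ (cs.length : Int) := by
  unfold tcFi1
  by_cases h : 0 < k - na
  · rw [if_pos h]
    set a := tcIdxs P cs 0 with ha
    have hla : a.length = cs.countP P := tcIdxs_length P cs 0
    have hmla : (k - na).toNat ≤ a.length := by omega
    have hget : PySem.List.pyGetD a (na - k) 0 = a[a.length - (k - na).toNat] := by
      have : na - k = -(((k - na).toNat : Int)) := by omega
      rw [this]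
      exact PySem.List.pyGetD_neg_natCast a _ 0 (by omega) hmla
    rw [hget]
    have hmem : a[a.length - (k - na).toNat]'(by omega) ∈ a := List.getElem_mem (by omega)
    have hb := tcIdxs_bounds P cs 0 _ hmem
    omega
  · rw [if_neg h]

theorem tcSuffC_iff (cs : List Char) (k na nb nc : Int) (hk : 1 ≤ k)
    (h0a : 0 ≤ na) (h0b : 0 ≤ nb) (h0c : 0 ≤ nc)
    (hta : k ≤ (cs.countP tcPa : Int)) (htb : k ≤ (cs.countP tcPb : Int))
    (hte : k ≤ (cs.countP tcPe : Int))
    (q : Nat) (hq : q ≤ cs.length) :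
    tcSuffC cs k na nb nc q ↔ (q : Int) ≤ tcFiC cs k na nb nc := by
  unfold tcSuffC tcFiC
  rw [tcFi1_iff tcPa cs k na hk h0a hta q hq, tcFi1_iff tcPb cs k nb hk h0b htb q hq,
      tcFi1_iff tcPe cs k nc hk h0c hte q hq]
  simp only [le_min_iff]
  tauto

theorem tcCounts_eq (cs : List Char) :
    tcCounts cs = ((cs.countP tcPa : Int), (cs.countP tcPb : Int), (cs.countP tcPe : Int)) := by
  suffices h : ∀ (t : Int × Int × Int),
      cs.foldl (fun t v =>
        if v = 'a' then (t.1 + 1, t.2.1, t.2.2)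
        else if v = 'b' then (t.1, t.2.1 + 1, t.2.2)
        else (t.1, t.2.1, t.2.2 + 1)) t
      = (t.1 + (cs.countP tcPa : Int), t.2.1 + (cs.countP tcPb : Int), t.2.2 + (cs.countP tcPe : Int)) by
    have := h (0, 0, 0); simpa [tcCounts] using this
  induction cs with
  | nil => intro t; simp
  | cons v r ih =>
    intro t
    simp only [List.foldl_cons, List.countP_cons, ih]
    by_cases ha : v = 'a'
    · simp [ha, tcPa, tcPb, tcPe]; omega
    · by_cases hb : v = 'b'
      · simp [ha, hb, tcPa, tcPb, tcPe]; omega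
      · simp [ha, hb, tcPa, tcPb, tcPe]
        push_cast
        omega

-- counting one step into the suffix
theorem tcC_succ (P : Char → Bool) (cs : List Char) (q : Nat) (v : Char) (r : List Char)
    (hd : cs.drop q = v :: r) :
    tcC P cs (q + 1) = tcC P cs q - (if P v then 1 else 0) := by
  have hr : cs.drop (q + 1) = r := by
    have := List.drop_drop (l := cs) (i := 1) (j := q)
    rw [← this]
    rw [hd]
    simp
  unfold tcC
  rw [hd, hr, List.countP_cons]
  by_cases h : P v <;> simp [h]

theorem tcAdvance_spec (cs : List Char) (k na nb nc : Int) :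
    ∀ (rest : List Char) (q : Nat), rest = cs.drop q → q ≤ cs.length →
    tcSuffC cs k na nb nc q →
    ∃ q', q ≤ q' ∧ q' ≤ cs.length ∧
      tcAdvance k na nb nc (tcC tcPa cs q, tcC tcPb cs q, tcC tcPe cs q) rest
        = ((tcC tcPa cs q', tcC tcPb cs q', tcC tcPe cs q'), cs.drop q') ∧
      tcSuffC cs k na nb nc q' ∧ (q' = cs.length ∨ ¬ tcSuffC cs k na nb nc (q' + 1)) := by
  intro rest
  induction rest with
  | nil =>
    intro q hrest hq hsuff
    refine ⟨q, le_refl _, hq, ?_, hsuff, Or.inl ?_⟩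
    · simp [tcAdvance, ← hrest]
    · have := List.drop_eq_nil_iff.1 hrest.symm
      omega
  | cons v r ih =>
    intro q hrest hq hsuff
    have hql : q < cs.length := by
      by_contra h
      have : cs.drop q = [] := List.drop_eq_nil_of_le (by omega)
      rw [this] at hrest; simp at hrest
    have hr : r = cs.drop (q + 1) := by
      have h2 := congrArg (List.drop 1) hrest
      simpa [List.drop_drop, Nat.add_comm] using h2
    have hsa := tcC_succ tcPa cs q v r hrest.symm
    have hsb := tcC_succ tcPb cs q v r hrest.symm
    have hse := tcC_succ tcPe cs q v r hrest.symm
    have hia : (if v = 'a' then (1:Int) else 0) = (if tcPa v then 1 else 0) := by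
      simp [tcPa]
    have hib : (if v = 'b' then (1:Int) else 0) = (if tcPb v then 1 else 0) := by
      simp [tcPb]
    have hie : (if v ≠ 'a' ∧ v ≠ 'b' then (1:Int) else 0) = (if tcPe v then 1 else 0) := by
      by_cases h1 : v = 'a' <;> by_cases h2 : v = 'b' <;> simp [h1, h2, tcPe]
    have hstep : tcAdvance k na nb nc (tcC tcPa cs q, tcC tcPb cs q, tcC tcPe cs q) (v :: r)
        = if k - na ≤ tcC tcPa cs (q+1) ∧ k - nb ≤ tcC tcPb cs (q+1) ∧ k - nc ≤ tcC tcPe cs (q+1)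
          then tcAdvance k na nb nc (tcC tcPa cs (q+1), tcC tcPb cs (q+1), tcC tcPe cs (q+1)) r
          else ((tcC tcPa cs q, tcC tcPb cs q, tcC tcPe cs q), v :: r) := by
      show (let nsa := tcC tcPa cs q - (if v = 'a' then 1 else 0)
            let nsb := tcC tcPb cs q - (if v = 'b' then 1 else 0)
            let nsc := tcC tcPe cs q - (if v ≠ 'a' ∧ v ≠ 'b' then 1 else 0)
            if k - na ≤ nsa ∧ k - nb ≤ nsb ∧ k - nc ≤ nsc then
              tcAdvance k na nb nc (nsa, nsb, nsc) r
            else ((tcC tcPa cs q, tcC tcPb cs q, tcC tcPe cs q), v :: r)) = _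
      simp only [hia, hib, hie, ← hsa, ← hsb, ← hse]
    by_cases hc : k - na ≤ tcC tcPa cs (q+1) ∧ k - nb ≤ tcC tcPb cs (q+1) ∧ k - nc ≤ tcC tcPe cs (q+1)
    · rw [hstep, if_pos hc]
      obtain ⟨q', h1, h2, h3, h4, h5⟩ := ih (q + 1) hr (by omega) (by unfold tcSuffC; exact hc)
      exact ⟨q', by omega, h2, h3, h4, h5⟩
    · rw [hstep, if_neg hc]
      exact ⟨q, le_refl _, hq, by rw [hrest], hsuff, Or.inr (by unfold tcSuffC; exact hc)⟩

theorem tcAdvance_fi (cs : List Char) (k na nb nc : Int) (hk : 1 ≤ k)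
    (h0a : 0 ≤ na) (h0b : 0 ≤ nb) (h0c : 0 ≤ nc)
    (hta : k ≤ (cs.countP tcPa : Int)) (htb : k ≤ (cs.countP tcPb : Int))
    (hte : k ≤ (cs.countP tcPe : Int))
    (q' : Nat) (h2 : q' ≤ cs.length) (h4 : tcSuffC cs k na nb nc q')
    (h5 : q' = cs.length ∨ ¬ tcSuffC cs k na nb nc (q' + 1)) :
    (q' : Int) = tcFiC cs k na nb nc := by
  have hle : (q' : Int) ≤ tcFiC cs k na nb nc :=
    (tcSuffC_iff cs k na nb nc hk h0a h0b h0c hta htb hte q' h2).1 h4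
  have hfin : tcFiC cs k na nb nc ≤ (cs.length : Int) := by
    unfold tcFiC
    have := tcFi1_le tcPa cs k na hk h0a hta
    have := tcFi1_le tcPb cs k nb hk h0b htb
    have := tcFi1_le tcPe cs k nc hk h0c hte
    omega
  rcases h5 with h5 | h5
  · subst h5; omega
  · by_cases hq : q' = cs.length
    · subst hq; omega
    · by_contra hne
      have hlt : (q' : Int) + 1 ≤ tcFiC cs k na nb nc := by omega
      have : tcSuffC cs k na nb nc (q' + 1) := by
        rw [tcSuffC_iff cs k na nb nc hk h0a h0b h0c hta htb hte (q' + 1) (by omega)]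
        push_cast
        omega
      exact h5 this

theorem tcN_nonneg (P : Char → Bool) (cs : List Char) (p : Nat) : 0 ≤ tcN P cs p := by
  unfold tcN; positivity

theorem tcN_succ (P : Char → Bool) (cs : List Char) (p : Nat) (hp : p < cs.length) :
    tcN P cs (p + 1) = tcN P cs p + (if P cs[p] then 1 else 0) := by
  unfold tcN
  rw [List.take_succ, List.getElem?_eq_getElem hp]
  simp only [Option.toList_some, List.countP_append, List.countP_cons, List.countP_nil]
  by_cases h : P cs[p] <;> simp [h]

-- the bucket-building fold of port A produces the three position lists
theorem tcBuckets (cs : List Char) : ∀ (s0 : Int) (acc : List Int × List Int × List Int),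
    (PySem.List.enumerate cs s0).foldl
      (fun (acc : List Int × List Int × List Int) iv =>
        if iv.2 = 'a' then (acc.1 ++ [iv.1], acc.2.1, acc.2.2)
        else if iv.2 = 'b' then (acc.1, acc.2.1 ++ [iv.1], acc.2.2)
        else (acc.1, acc.2.1, acc.2.2 ++ [iv.1]))
      acc
    = (acc.1 ++ tcIdxs tcPa cs s0, acc.2.1 ++ tcIdxs tcPb cs s0, acc.2.2 ++ tcIdxs tcPe cs s0) := by
  induction cs with
  | nil => intro s0 acc; simp [PySem.List.enumerate_nil, tcIdxs]
  | cons v r ih =>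
    intro s0 acc
    rw [PySem.List.enumerate_cons, List.foldl_cons, ih]
    by_cases ha : v = 'a'
    · simp [ha, tcIdxs, tcPa, tcPb, tcPe]
    · by_cases hb : v = 'b'
      · simp [ha, hb, tcIdxs, tcPa, tcPb, tcPe]
      · simp [ha, hb, tcIdxs, tcPa, tcPb, tcPe]

set_option maxHeartbeats 2000000 in
theorem tcMainFold (cs : List Char) (k : Int) (hk : 1 ≤ k)
    (hall : ∀ v ∈ cs, v = 'a' ∨ v = 'b' ∨ v = 'c')
    (hta : k ≤ (cs.countP tcPa : Int)) (htb : k ≤ (cs.countP tcPb : Int))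
    (hte : k ≤ (cs.countP tcPe : Int)) :
    ∀ (rest : List Char) (p : Nat), rest = cs.drop p →
    ∀ (q : Nat) (res : Int), q ≤ cs.length →
    tcSuffC cs k (tcN tcPa cs p) (tcN tcPb cs p) (tcN tcPc cs p) q →
    ((q : Int) = tcFiC cs k (tcN tcPa cs p) (tcN tcPb cs p) (tcN tcPc cs p)) →
    ((PySem.List.enumerate rest (p : Int)).foldl
      (fun (st : Int × Int × Int × Int) iv =>
        let na := st.1 + (if iv.2 = 'a' then 1 else 0)
        let nb := st.2.1 + (if iv.2 = 'b' then 1 else 0)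
        let nc := st.2.2.1 + (if iv.2 = 'c' then 1 else 0)
        let fi1 := if 0 < k - na then PySem.List.pyGetD (tcIdxs tcPa cs 0) (na - k) 0 else (cs.length : Int)
        let fi2 := if 0 < k - nb then PySem.List.pyGetD (tcIdxs tcPb cs 0) (nb - k) 0 else (cs.length : Int)
        let fi3 := if 0 < k - nc then PySem.List.pyGetD (tcIdxs tcPe cs 0) (nc - k) 0 else (cs.length : Int)
        (na, nb, nc, min st.2.2.2 (iv.1 + 1 + (cs.length : Int) - min (min fi1 fi2) fi3)))
      (tcN tcPa cs p, tcN tcPb cs p, tcN tcPc cs p, res)).2.2.2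
    = ((PySem.List.enumerate rest (p : Int)).foldl
      (fun (st : (Int × Int × Int) × (Int × Int × Int) × List Char × Int) iv =>
        let na := st.1.1 + (if iv.2 = 'a' then 1 else 0)
        let nb := st.1.2.1 + (if iv.2 = 'b' then 1 else 0)
        let nc := st.1.2.2 + (if iv.2 ≠ 'a' ∧ iv.2 ≠ 'b' then 1 else 0)
        let ar := tcAdvance k na nb nc st.2.1 st.2.2.1
        let cost := iv.1 + 1 + (ar.2.length : Int)
        ((na, nb, nc), ar.1, ar.2, if cost < st.2.2.2 then cost else st.2.2.2))
      ((tcN tcPa cs p, tcN tcPb cs p, tcN tcPc cs p),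
       (tcC tcPa cs q, tcC tcPb cs q, tcC tcPe cs q), cs.drop q, res)).2.2.2 := by
  intro rest
  induction rest with
  | nil => intro p _ q res _ _ _; simp [PySem.List.enumerate_nil]
  | cons v r ih =>
    intro p hrest q res hq hsuff hfi
    have hpl : p < cs.length := by
      by_contra h
      have : cs.drop p = [] := List.drop_eq_nil_of_le (by omega)
      rw [this] at hrest; simp at hrest
    have hvcs : cs.drop p = cs[p] :: cs.drop (p + 1) := List.drop_eq_getElem_cons hpl
    have hv : v = cs[p] := by rw [← hrest] at hvcs; exact (List.cons.injEq _ _ _ _ ▸ hvcs).1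
    have hr : r = cs.drop (p + 1) := by rw [← hrest] at hvcs; exact (List.cons.injEq _ _ _ _ ▸ hvcs).2
    -- the three prefix-count updates
    have hna : tcN tcPa cs p + (if v = 'a' then (1:Int) else 0) = tcN tcPa cs (p + 1) := by
      rw [tcN_succ tcPa cs p hpl, hv]; simp [tcPa]
    have hnb : tcN tcPb cs p + (if v = 'b' then (1:Int) else 0) = tcN tcPb cs (p + 1) := by
      rw [tcN_succ tcPb cs p hpl, hv]; simp [tcPb]
    have hnc : tcN tcPc cs p + (if v = 'c' then (1:Int) else 0) = tcN tcPc cs (p + 1) := by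
      rw [tcN_succ tcPc cs p hpl, hv]; simp [tcPc]
    -- B's consistent non-'a'/'b' increment agrees with A's literal-'c' one on Pre_'s alphabet
    have hncB : tcN tcPc cs p + (if v ≠ 'a' ∧ v ≠ 'b' then (1:Int) else 0) = tcN tcPc cs (p + 1) := by
      rw [tcN_succ tcPc cs p hpl, hv]
      rcases hall cs[p] (List.getElem_mem hpl) with h | h | h <;> simp [h, tcPc]
    have hmono : ∀ P : Char → Bool, tcN P cs p ≤ tcN P cs (p + 1) := by
      intro P; rw [tcN_succ P cs p hpl]; split <;> omega
    have hsuff' : tcSuffC cs k (tcN tcPa cs (p+1)) (tcN tcPb cs (p+1)) (tcN tcPc cs (p+1)) q := by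
      obtain ⟨h1, h2, h3⟩ := hsuff
      have ha := hmono tcPa
      have hb := hmono tcPb
      have hc := hmono tcPc
      exact ⟨by omega, by omega, by omega⟩
    obtain ⟨q', hq1, hq2, heq, hS, hD⟩ :=
      tcAdvance_spec cs k (tcN tcPa cs (p+1)) (tcN tcPb cs (p+1)) (tcN tcPc cs (p+1))
        (cs.drop q) q rfl hq hsuff'
    have hfi' : (q' : Int) = tcFiC cs k (tcN tcPa cs (p+1)) (tcN tcPb cs (p+1)) (tcN tcPc cs (p+1)) :=
      tcAdvance_fi cs k _ _ _ hk (tcN_nonneg _ _ _) (tcN_nonneg _ _ _) (tcN_nonneg _ _ _)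
        hta htb hte q' hq2 hS hD
    -- unfold one step of both folds
    rw [PySem.List.enumerate_cons, List.foldl_cons, List.foldl_cons]
    simp only []
    rw [hna, hnb, hnc, hncB, heq]
    have hlen : (((List.drop q' cs).length : Nat) : Int) = (cs.length : Int) - (q' : Int) := by
      rw [List.length_drop]; omega
    rw [hlen]
    have hminA : min (min
          (if 0 < k - tcN tcPa cs (p+1) then PySem.List.pyGetD (tcIdxs tcPa cs 0) (tcN tcPa cs (p+1) - k) 0 else (cs.length : Int))
          (if 0 < k - tcN tcPb cs (p+1) then PySem.List.pyGetD (tcIdxs tcPb cs 0) (tcN tcPb cs (p+1) - k) 0 else (cs.length : Int)))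
          (if 0 < k - tcN tcPc cs (p+1) then PySem.List.pyGetD (tcIdxs tcPe cs 0) (tcN tcPc cs (p+1) - k) 0 else (cs.length : Int))
        = (q' : Int) := by
      rw [hfi']; rfl
    rw [hminA]
    have harith : ((p:Int) + 1 + ((cs.length : Int) - (q' : Int))) = (p:Int) + 1 + (cs.length : Int) - (q' : Int) := by ring
    rw [harith]
    have hite : (if (p:Int) + 1 + (cs.length : Int) - (q' : Int) < res
          then (p:Int) + 1 + (cs.length : Int) - (q' : Int) else res)
        = min res ((p:Int) + 1 + (cs.length : Int) - (q' : Int)) := by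
      rw [min_def]; split <;> split <;> omega
    rw [hite]
    have hcast : ((p:Int) + 1) = (((p + 1 : Nat)) : Int) := by push_cast; ring
    rw [hcast]
    exact ih (p+1) hr q' (min res ((p:Int) + 1 + (cs.length : Int) - (q' : Int))) hq2 hS hfi'

theorem tcN_zero (P : Char → Bool) (cs : List Char) : tcN P cs 0 = 0 := by simp [tcN]
theorem tcC_zero (P : Char → Bool) (cs : List Char) : tcC P cs 0 = (cs.countP P : Int) := by
  simp [tcC]

set_option maxHeartbeats 2000000 in
theorem tc_partition (cs : List Char) :
    cs.countP tcPa + cs.countP tcPb + cs.countP tcPe = cs.length := by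
  induction cs with
  | nil => simp
  | cons v r ih =>
    simp only [List.countP_cons, List.length_cons]
    by_cases ha : v = 'a'
    · simp [ha, tcPa, tcPb, tcPe]; omega
    · by_cases hb : v = 'b'
      · simp [ha, hb, tcPa, tcPb, tcPe]; omega
      · simp [ha, hb, tcPa, tcPb, tcPe]; omega

theorem tc_count_a (cs : List Char) : cs.count 'a' = cs.countP tcPa := by
  induction cs with
  | nil => rfl
  | cons v r ih => simp [List.count_cons, List.countP_cons, tcPa, ih]

theorem tc_count_b (cs : List Char) : cs.count 'b' = cs.countP tcPb := by
  induction cs with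
  | nil => rfl
  | cons v r ih => simp [List.count_cons, List.countP_cons, tcPb, ih]

set_option maxHeartbeats 2000000 in
theorem tc_final (s : String) (k : Int) (hk : 0 ≤ k)
    (hcase : (∀ v ∈ s.toList, v = 'a' ∨ v = 'b' ∨ v = 'c') ∨ k = 0 ∨
      (s.toList.countP tcPa : Int) < k ∨ (s.toList.countP tcPb : Int) < k ∨
      (s.toList.countP tcPe : Int) < k) :
    takeCharacters s k = takeCharacters_alt s k := by
  unfold takeCharacters takeCharacters_alt
  by_cases hk0 : k = 0
  · simp [hk0]
  · have hk1 : 1 ≤ k := by omega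
    simp only []
    set cs := s.toList with hcs
    rw [tcBuckets cs 0 ([], [], [])]
    simp only [List.nil_append]
    rw [tcCounts_eq cs]
    simp only []
    rw [if_neg hk0, if_neg hk0]
    rw [tcIdxs_length tcPa cs 0, tcIdxs_length tcPb cs 0, tcIdxs_length tcPe cs 0]
    by_cases hcond : (cs.countP tcPa : Int) < k ∨ (cs.countP tcPb : Int) < k ∨ (cs.countP tcPe : Int) < k
    · rw [if_pos hcond, if_pos hcond]
    · rw [if_neg hcond, if_neg hcond]
      push_neg at hcond
      obtain ⟨hta, htb, hte⟩ := hcond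
      have hall : ∀ v ∈ cs, v = 'a' ∨ v = 'b' ∨ v = 'c' := by
        rcases hcase with h | h | h | h | h
        · exact h
        · exact absurd h hk0
        · exact absurd hta (by omega)
        · exact absurd htb (by omega)
        · exact absurd hte (by omega)
      -- initial advance from q = 0
      have h0suff : tcSuffC cs k 0 0 0 0 := by
        refine ⟨?_, ?_, ?_⟩ <;> rw [tcC_zero] <;> omega
      obtain ⟨q0, _, hq02, heq0, hS0, hD0⟩ :=
        tcAdvance_spec cs k 0 0 0 cs 0 (by simp) (by omega) h0suff
      have hfi0 : (q0 : Int) = tcFiC cs k 0 0 0 :=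
        tcAdvance_fi cs k 0 0 0 hk1 le_rfl le_rfl le_rfl hta htb hte q0 hq02 hS0 hD0
      have hctrip : ((cs.countP tcPa : Int), (cs.countP tcPb : Int), (cs.countP tcPe : Int))
          = (tcC tcPa cs 0, tcC tcPb cs 0, tcC tcPe cs 0) := by
        simp [tcC_zero]
      rw [hctrip, heq0]
      simp only []
      -- A's initial res equals n - q0
      have hres0 : min (min (PySem.List.pyGetD (tcIdxs tcPa cs 0) (-k) 0)
            (PySem.List.pyGetD (tcIdxs tcPb cs 0) (-k) 0))
            (PySem.List.pyGetD (tcIdxs tcPe cs 0) (-k) 0) = (q0 : Int) := by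
        rw [hfi0]
        unfold tcFiC tcFi1
        rw [if_pos (by omega : 0 < k - 0), if_pos (by omega : 0 < k - 0), if_pos (by omega : 0 < k - 0)]
        norm_num
      rw [hres0]
      have hlen0 : (((List.drop q0 cs).length : Nat) : Int) = (cs.length : Int) - (q0 : Int) := by
        rw [List.length_drop]; omega
      rw [hlen0]
      -- main fold
      have hmain := tcMainFold cs k hk1 hall hta htb hte cs 0 (by simp) q0
        ((cs.length : Int) - (q0 : Int)) hq02
        (by rw [tcN_zero, tcN_zero, tcN_zero]; exact hS0)
        (by rw [tcN_zero, tcN_zero, tcN_zero]; exact hfi0)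
      rw [tcN_zero, tcN_zero, tcN_zero, Nat.cast_zero] at hmain
      exact hmain

-- ===== VERDICT (by name: the statement is the Claim_ definition above) =====
theorem takeCharacters_spec : Claim_equal_takeCharacters := by
  intro s k _ hpre
  unfold Spec_takeCharacters
  refine tc_final s k hpre.1 ?_
  have hpart := tc_partition s.toList
  have h1 := tc_count_a s.toList
  have h2 := tc_count_b s.toList
  rcases hpre.2 with h | h | h | h | h
  · left
    intro v hv
    have := List.all_eq_true.mp h v hv
    simp only [Bool.or_eq_true, beq_iff_eq] at this
    tauto
  · exact Or.inr (Or.inl h)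
  · exact Or.inr (Or.inr (Or.inl (by rw [h1] at h; exact h)))
  · exact Or.inr (Or.inr (Or.inr (Or.inl (by rw [h2] at h; exact h))))
  · refine Or.inr (Or.inr (Or.inr (Or.inr ?_)))
    rw [h1, h2] at h
    push_cast at h ⊢
    omega
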